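-- pv_equiv track=rewrite | github.com/wsgisler/ibm-ponder-challenge | 2021-02/solution.py | read_hexgrid
-- ===== SOURCE A (Python) =====
-- def read_hexgrid(hexgrid):
--     """
--     Reads a hexgrid and returns a 2d array where the first index represents the column (seen from the bottom left corner, starting with 1)
--     and the second index represents the row (seen from the bottom, starting with 1). For a n*n hexgrid, this returns a (n+1)*(n+1) grid. The 0 indexes are empty (None)
--     """
--     h2b = {'0':'0000', '1':'0001', '2':'0010', '3':'0011', '4':'0100', '5':'0101', '6':'0110', '7':'0111', '8':'1000', '9':'1001', 'a':'1010', 'b':'1011', 'c':'1100', 'd':'1101', 'e':'1110', 'f':'1111'}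
--     n = len(hexgrid)
--     grid = [[None for i in range(n+1)] for j in range(n+1)]
--     for r in range(n):
--         for c in range(n):
--             grid[c+1][r+1] = h2b[hexgrid[n-r-1][c]]
--     return grid
-- ===== SOURCE B (Python) =====
-- def read_hexgrid(hexgrid):
--     """
--     Reads a hexgrid and returns a 2d array where the first index represents the column (seen from the bottom left corner, starting with 1)
--     and the second index represents the row (seen from the bottom, starting with 1). For a n*n hexgrid, this returns a (n+1)*(n+1) grid. The 0 indexes are empty (None)
--     """
--     h2b = {'0':'0000', '1':'0001', '2':'0010', '3':'0011', '4':'0100', '5':'0101', '6':'0110', '7':'0111', '8':'1000', '9':'1001', 'a':'1010', 'b':'1011', 'c':'1100', 'd':'1101', 'e':'1110', 'f':'1111'}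
--     n = len(hexgrid)
--     # encode each input row once into a single 4n-bit string
--     bits = [''.join(h2b[row[c]] for c in range(n)) for row in hexgrid]
--     # gather: cell (c, r) is bit-block c-1 of the r-th row from the bottom
--     grid = [[None] * (n + 1)]
--     for c in range(1, n + 1):
--         grid.append([None] + [bits[n - r][4*(c-1):4*c] for r in range(1, n + 1)])
--     return grid
-- ===== Notes on version B (the rewrite author's own statement) =====
-- stated objective: alternative
-- what changed: B changes the data representation: it first encodes each hex row once into a single 4n-character binary string, then fills each output cell by arithmetic slicing (bits[n-r][4*(c-1):4*c]) of those strings -- a two-stage encode-then-gather pipeline instead of A's per-character dict scatter into a preallocated (n+1)x(n+1) grid.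
import Mathlib
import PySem

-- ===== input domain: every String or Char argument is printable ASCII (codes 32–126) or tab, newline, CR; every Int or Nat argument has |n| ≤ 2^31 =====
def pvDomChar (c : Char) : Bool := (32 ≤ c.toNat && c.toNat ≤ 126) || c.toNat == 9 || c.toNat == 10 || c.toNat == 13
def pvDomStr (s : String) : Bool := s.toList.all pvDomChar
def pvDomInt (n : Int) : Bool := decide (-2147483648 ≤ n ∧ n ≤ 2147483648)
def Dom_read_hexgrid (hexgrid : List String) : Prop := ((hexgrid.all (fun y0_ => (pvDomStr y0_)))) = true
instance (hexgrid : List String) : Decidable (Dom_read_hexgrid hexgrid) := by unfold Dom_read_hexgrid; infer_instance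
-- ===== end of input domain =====

-- B changes the representation: it encodes each hex row once into one 4n-character binary
-- string and then gathers every output cell by arithmetic slicing of those strings, instead
-- of A's per-character dict scatter into a preallocated (n+1)×(n+1) grid (objective:
-- alternative decomposition, same cost).

-- ===== PORT A =====
def h2b : PySem.Dict Char String := PySem.Dict.ofList
  [('0',"0000"),('1',"0001"),('2',"0010"),('3',"0011"),('4',"0100"),('5',"0101"),('6',"0110"),('7',"0111"),
   ('8',"1000"),('9',"1001"),('a',"1010"),('b',"1011"),('c',"1100"),('d',"1101"),('e',"1110"),('f',"1111")]

def read_hexgrid (hexgrid : List String) : List (List (Option String)) :=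
  let n : Int := PySem.List.len hexgrid
  let grid : List (List (Option String)) :=
    (PySem.List.pyRange 0 (n+1) 1).map (fun _ =>
      (PySem.List.pyRange 0 (n+1) 1).map (fun _ => (none : Option String)))
  (PySem.List.pyRange 0 n 1).foldl (fun grid r =>
    (PySem.List.pyRange 0 n 1).foldl (fun grid c =>
      PySem.List.pySetD grid (c+1)
        (PySem.List.pySetD (PySem.List.pyGetD grid (c+1) []) (r+1)
          (((PySem.List.pyGet? hexgrid (n - r - 1)).bind
              (fun row => PySem.Str.pyGet? row c)).bind
            (fun ch => PySem.Dict.get? h2b ch)))) grid) grid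

-- ===== PORT B =====
-- ''.join(h2b[row[c]] for c in range(n)): the mapM is the generator — none = a raise
-- (IndexError from row[c] or KeyError from h2b), exactly where Python B raises (outside Pre_).
def read_hexgrid_alt (hexgrid : List String) : List (List (Option String)) :=
  let n : Int := PySem.List.len hexgrid
  let bits : List (Option String) := hexgrid.map (fun row =>
    ((PySem.List.pyRange 0 n 1).mapM (fun c =>
        (PySem.Str.pyGet? row c).bind (fun ch => PySem.Dict.get? h2b ch))).map
      (fun parts => PySem.Str.join "" parts))
  List.replicate (hexgrid.length + 1) (none : Option String) ::
    (PySem.List.pyRange 1 (n+1) 1).map (fun c =>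
      (none : Option String) ::
        (PySem.List.pyRange 1 (n+1) 1).map (fun r =>
          ((PySem.List.pyGet? bits (n - r)).bind id).map
            (fun s => PySem.Str.slice s (some (4*(c-1))) (some (4*c)))))

-- ===== PRECONDITION & SPEC =====
-- Pre_ excludes exactly the inputs where Python A raises: a row shorter than len(hexgrid)
-- (IndexError) or a character among the first len(hexgrid) of a row that is not a lowercase
-- hex digit (KeyError in h2b).
def hexKeys : List Char := ['0','1','2','3','4','5','6','7','8','9','a','b','c','d','e','f']

def Pre_read_hexgrid (hexgrid : List String) : Prop :=
  hexgrid.all (fun s => decide (hexgrid.length ≤ s.toList.length)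
    && (s.toList.take hexgrid.length).all (fun ch => hexKeys.contains ch)) = true
instance (hexgrid : List String) : Decidable (Pre_read_hexgrid hexgrid) := by
  unfold Pre_read_hexgrid; infer_instance

def pvWitness_read_hexgrid : List String := ["2a", "f0"]

def Spec_read_hexgrid (hexgrid : List String) (out : List (List (Option String))) : Prop := out = read_hexgrid_alt hexgrid
instance (hexgrid : List String) (out : List (List (Option String))) : Decidable (Spec_read_hexgrid hexgrid out) := by unfold Spec_read_hexgrid; infer_instance

-- ===== CLAIM (what is proved, stated in full; the proofs are below) =====
def Claim_equal_read_hexgrid : Prop := ∀ (hexgrid : List String), Dom_read_hexgrid hexgrid → Pre_read_hexgrid hexgrid → Spec_read_hexgrid hexgrid (read_hexgrid hexgrid)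

-- ===== LEMMAS AND PROOFS =====

-- the value A stores at grid[c+1][r+1], in Nat-world
def valA (hexgrid : List String) (r c : Nat) : Option String :=
  ((hexgrid[hexgrid.length - r - 1]?).bind (fun s => s.toList[c]?)).bind
    (fun ch => PySem.Dict.get? h2b ch)

-- A's algorithm with all Int indices converted to Nat
def AgridN (hexgrid : List String) : List (List (Option String)) :=
  (List.range hexgrid.length).foldl (fun g r =>
    (List.range hexgrid.length).foldl (fun g c =>
      g.set (c+1) ((g.getD (c+1) []).set (r+1) (valA hexgrid r c))) g)
    (List.replicate (hexgrid.length+1) (List.replicate (hexgrid.length+1) (none : Option String)))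

lemma portA_eq (hexgrid : List String) : read_hexgrid hexgrid = AgridN hexgrid := by
  unfold read_hexgrid AgridN
  simp only [PySem.List.len_eq]
  rw [show ((hexgrid.length : Int) + 1) = ((hexgrid.length + 1 : Nat) : Int) by push_cast; ring]
  simp only [PySem.List.pyRange_zero_natCast, List.foldl_map, List.map_map, Function.comp_def,
    List.map_const', List.length_range]
  refine PySem.List.foldl_congr_mem _ _ _ _ ?_
  intro g r hr
  have hrN : r < hexgrid.length := List.mem_range.mp hr
  refine PySem.List.foldl_congr_mem _ _ _ _ ?_
  intro g' c hc
  rw [show ((c : Int) + 1) = ((c + 1 : Nat) : Int) by push_cast; ring,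
      show ((r : Int) + 1) = ((r + 1 : Nat) : Int) by push_cast; ring,
      show ((hexgrid.length : Int) - r - 1) = ((hexgrid.length - r - 1 : Nat) : Int) by omega,
      PySem.List.pySetD_natCast, PySem.List.pySetD_natCast, PySem.List.pyGetD_natCast,
      PySem.List.pyGet?_natCast]
  simp only [PySem.Str.pyGet?_natCast]
  rfl

-- generic scatter over indices 1..k of a list
lemma foldl_scatter_length {α : Type} (d : α) (u : Nat → α → α) (f : List α → Nat → List α)
    (hf : ∀ h c, f h c = h.set (c+1) (u c (h.getD (c+1) d))) (g : List α) (k : Nat) :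
    ((List.range k).foldl f g).length = g.length := by
  induction k with
  | zero => rfl
  | succ k ih =>
    rw [List.range_succ, List.foldl_append, List.foldl_cons, List.foldl_nil, hf,
        List.length_set]
    exact ih

lemma foldl_scatter_getElem? {α : Type} (d : α) (u : Nat → α → α) (f : List α → Nat → List α)
    (hf : ∀ h c, f h c = h.set (c+1) (u c (h.getD (c+1) d))) (g : List α) (k i : Nat) :
    ((List.range k).foldl f g)[i]? =
      if 1 ≤ i ∧ i ≤ k ∧ i < g.length then some (u (i-1) (g.getD i d)) else g[i]? := by
  induction k with
  | zero =>
    rw [List.range_zero, List.foldl_nil, if_neg (by omega)]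
  | succ k ih =>
    rw [List.range_succ, List.foldl_append, List.foldl_cons, List.foldl_nil, hf]
    have hF := foldl_scatter_length d u f hf g k
    rw [List.getElem?_set]
    by_cases h1 : k + 1 = i
    · subst h1
      rw [if_pos rfl]
      by_cases h2 : k + 1 < (List.foldl f g (List.range k)).length
      · rw [if_pos h2, if_pos ⟨by omega, by omega, by omega⟩,
            List.getD_eq_getElem?_getD, ih, if_neg (by omega), List.getD_eq_getElem?_getD]
        norm_num
      · rw [if_neg h2, if_neg (by omega), List.getElem?_eq_none (by omega)]
    · rw [if_neg h1, ih]
      exact if_congr (by omega) rfl rfl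

-- the explicit (n+1)×(n+1) grid both programs produce
def rowE (hexgrid : List String) (c : Nat) : List (Option String) :=
  (none : Option String) :: (List.range hexgrid.length).map (fun r => valA hexgrid r c)

lemma outer_length (hexgrid : List String) (k : Nat) :
    ((List.range k).foldl (fun g r =>
      (List.range hexgrid.length).foldl (fun g c =>
        g.set (c+1) ((g.getD (c+1) []).set (r+1) (valA hexgrid r c))) g)
      (List.replicate (hexgrid.length+1) (List.replicate (hexgrid.length+1) (none : Option String)))).length
    = hexgrid.length + 1 := by
  induction k with
  | zero => simp
  | succ k ih =>
    rw [List.range_succ, List.foldl_append, List.foldl_cons, List.foldl_nil,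
        foldl_scatter_length ([] : List (Option String))
          (fun c x => x.set (k+1) (valA hexgrid k c)) _ (fun _ _ => rfl)]
    exact ih

lemma rowfold_eq (hexgrid : List String) (c : Nat) :
    (List.range hexgrid.length).foldl (fun row r => row.set (r+1) (valA hexgrid r c))
      (List.replicate (hexgrid.length+1) (none : Option String)) = rowE hexgrid c := by
  apply List.ext_getElem?
  intro j
  rw [foldl_scatter_getElem? (none : Option String) (fun r _ => valA hexgrid r c) _
        (fun _ _ => rfl), List.length_replicate]
  unfold rowE
  rcases Nat.eq_zero_or_pos j with hj | hj
  · subst hj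
    rw [if_neg (by omega)]
    rw [List.getElem?_replicate, if_pos (by omega)]
    rfl
  · obtain ⟨j', rfl⟩ : ∃ j', j = j' + 1 := ⟨j - 1, by omega⟩
    rw [List.getElem?_cons_succ, List.getElem?_map]
    by_cases hle : j' < hexgrid.length
    · rw [if_pos ⟨by omega, by omega, by omega⟩, List.getElem?_range hle]
      simp
    · rw [if_neg (by omega), List.getElem?_replicate, if_neg (by omega),
          List.getElem?_eq_none (by simp; omega)]
      rfl

lemma outer_getElem? (hexgrid : List String) (k i : Nat) :
    ((List.range k).foldl (fun g r =>
      (List.range hexgrid.length).foldl (fun g c =>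
        g.set (c+1) ((g.getD (c+1) []).set (r+1) (valA hexgrid r c))) g)
      (List.replicate (hexgrid.length+1) (List.replicate (hexgrid.length+1) (none : Option String))))[i]? =
    if 1 ≤ i ∧ i ≤ hexgrid.length then
      some ((List.range k).foldl (fun row r => row.set (r+1) (valA hexgrid r (i-1)))
        (List.replicate (hexgrid.length+1) (none : Option String)))
    else (List.replicate (hexgrid.length+1) (List.replicate (hexgrid.length+1) (none : Option String)))[i]? := by
  induction k with
  | zero =>
    rw [List.range_zero, List.foldl_nil, List.foldl_nil]
    split_ifs with h
    · rw [List.getElem?_replicate, if_pos (by omega)]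
    · rfl
  | succ k ih =>
    rw [List.range_succ, List.foldl_append, List.foldl_cons, List.foldl_nil,
        foldl_scatter_getElem? ([] : List (Option String))
          (fun c x => x.set (k+1) (valA hexgrid k c)) _ (fun _ _ => rfl),
        outer_length hexgrid k]
    rw [List.foldl_append, List.foldl_cons, List.foldl_nil]
    by_cases h : 1 ≤ i ∧ i ≤ hexgrid.length
    · rw [if_pos ⟨h.1, h.2, by omega⟩, if_pos h,
          List.getD_eq_getElem?_getD, ih, if_pos h]
      rfl
    · rw [if_neg (show ¬(1 ≤ i ∧ i ≤ hexgrid.length ∧ i < hexgrid.length + 1) by omega),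
          ih, if_neg h, if_neg h]

lemma Agrid_explicit (hexgrid : List String) :
    AgridN hexgrid =
      List.replicate (hexgrid.length+1) (none : Option String) ::
        (List.range hexgrid.length).map (rowE hexgrid) := by
  apply List.ext_getElem?
  intro i
  unfold AgridN
  rw [outer_getElem? hexgrid hexgrid.length i]
  rcases Nat.eq_zero_or_pos i with hi | hi
  · subst hi
    rw [if_neg (by omega), List.getElem?_replicate, if_pos (by omega)]
    rfl
  · obtain ⟨i', rfl⟩ : ∃ i', i = i' + 1 := ⟨i - 1, by omega⟩
    rw [List.getElem?_cons_succ, List.getElem?_map]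
    by_cases hle : i' < hexgrid.length
    · rw [if_pos ⟨by omega, by omega⟩, List.getElem?_range hle]
      simp only [Option.map_some]
      rw [rowfold_eq]
      simp
    · rw [if_neg (by omega), List.getElem?_replicate, if_neg (by omega),
          List.getElem?_eq_none (by simp; omega)]
      rfl

-- ===== B-side lemmas =====

-- the string h2b maps a hex digit to
def hexVal (ch : Char) : String := (PySem.Dict.get? h2b ch).getD ""

lemma h2b_mem (ch : Char) (h : ch ∈ hexKeys) :
    PySem.Dict.get? h2b ch = some (hexVal ch) ∧ (hexVal ch).toList.length = 4 := by
  fin_cases h <;> exact ⟨by decide, by decide⟩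

lemma mapM_some {α β : Type} (f : α → Option β) (g : α → β) (l : List α)
    (h : ∀ x ∈ l, f x = some (g x)) : l.mapM f = some (l.map g) := by
  induction l with
  | nil => rfl
  | cons x t ih =>
    rw [List.mapM_cons, h x (by simp), ih (fun y hy => h y (by simp [hy]))]
    rfl

lemma join_nil_flatten (ps : List (List Char)) : PySem.Chars.join [] ps = ps.flatten := by
  induction ps with
  | nil => rw [PySem.Chars.join_nil]; rfl
  | cons p t ih =>
    cases t with
    | nil => rw [PySem.Chars.join_singleton]; simp
    | cons q r =>
      rw [PySem.Chars.join_cons_cons, ih]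
      simp

lemma flatten_block (bs : List (List Char)) (h4 : ∀ b ∈ bs, b.length = 4) :
    ∀ k, k < bs.length → ((bs.flatten).drop (4*k)).take 4 = bs.getD k [] := by
  induction bs with
  | nil => intro k hk; simp at hk
  | cons b t ih =>
    intro k hk
    have hb : b.length = 4 := h4 b (by simp)
    cases k with
    | zero =>
      simp only [Nat.mul_zero, List.drop_zero, List.flatten_cons, List.getD_cons_zero]
      rw [List.take_append_of_le_length (by omega), ← hb, List.take_length]
    | succ k =>
      have h1 : 4 * (k + 1) = b.length + 4 * k := by omega
      rw [List.flatten_cons, h1, ← List.drop_drop, List.drop_left, List.getD_cons_succ]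
      exact ih (fun x hx => h4 x (by simp [hx])) k (by simpa using hk)

-- consequences of Pre_ for one row
lemma pre_row {hexgrid : List String} (hpre : Pre_read_hexgrid hexgrid) {s : String}
    (hs : s ∈ hexgrid) :
    hexgrid.length ≤ s.toList.length ∧
      ∀ c < hexgrid.length, s.toList.getD c ' ' ∈ hexKeys := by
  unfold Pre_read_hexgrid at hpre
  rw [List.all_eq_true] at hpre
  have h := hpre s hs
  rw [Bool.and_eq_true, decide_eq_true_iff, List.all_eq_true] at h
  refine ⟨h.1, fun c hc => ?_⟩
  have hc' : c < s.toList.length := by omega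
  have hm : s.toList[c] ∈ s.toList.take hexgrid.length := by
    have := List.getElem_take (xs := s.toList) (i := c) (j := hexgrid.length)
      (h := by rw [List.length_take]; omega)
    rw [← this]
    exact List.getElem_mem _
  have := h.2 _ hm
  rw [List.getD_eq_getElem _ _ hc']
  simpa using this

-- the encoding pass succeeds on a Pre_-compatible row
lemma encode_eq (s : String) (n : Nat) (hlen : n ≤ s.toList.length)
    (hkeys : ∀ c < n, s.toList.getD c ' ' ∈ hexKeys) :
    ((PySem.List.pyRange 0 (n : Int) 1).mapM (fun c =>
        (PySem.Str.pyGet? s c).bind (fun ch => PySem.Dict.get? h2b ch)))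
      = some (((List.range n).map (fun c => hexVal (s.toList.getD c ' ')))) := by
  have hsome : ∀ x ∈ PySem.List.pyRange 0 (n : Int) 1,
      ((PySem.Str.pyGet? s x).bind (fun ch => PySem.Dict.get? h2b ch))
        = some (hexVal (s.toList.getD x.toNat ' ')) := by
    intro x hx
    have hx' := (PySem.List.mem_pyRange_one).mp hx
    obtain ⟨k, rfl⟩ : ∃ k : Nat, x = (k : Int) := ⟨x.toNat, by omega⟩
    have hk : k < n := by exact_mod_cast hx'.2
    rw [PySem.Str.pyGet?_natCast, List.getElem?_eq_getElem (by omega)]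
    simp only [Option.bind_some, Int.toNat_natCast]
    have := (h2b_mem (s.toList.getD k ' ') (hkeys k hk)).1
    rw [List.getD_eq_getElem _ _ (by omega)] at this ⊢
    exact this
  rw [mapM_some _ _ _ hsome, PySem.List.pyRange_zero_nat, List.map_map]
  simp

-- proof-side name for B's row-encoding pass (the port's `bits` entries)
def encRow (n : Nat) (row : String) : Option String :=
  ((PySem.List.pyRange 0 (n : Int) 1).mapM (fun c =>
      (PySem.Str.pyGet? row c).bind (fun ch => PySem.Dict.get? h2b ch))).map
    (fun parts => PySem.Str.join "" parts)

lemma encRow_eq (hexgrid : List String) (hpre : Pre_read_hexgrid hexgrid) (s : String)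
    (hs : s ∈ hexgrid) :
    encRow hexgrid.length s =
      some (PySem.Str.join ""
        ((List.range hexgrid.length).map (fun c => hexVal (s.toList.getD c ' ')))) := by
  obtain ⟨hlen, hkeys⟩ := pre_row hpre hs
  unfold encRow
  rw [encode_eq s hexgrid.length hlen hkeys]
  rfl

-- one cell of B equals the corresponding valA
lemma cellB_eq (hexgrid : List String) (hpre : Pre_read_hexgrid hexgrid) (c r : Nat)
    (hc : c < hexgrid.length) (hr : r < hexgrid.length) :
    ((PySem.List.pyGet? (hexgrid.map (encRow hexgrid.length))
        ((hexgrid.length : Int) - (1 + (r : Int)))).bind id).map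
      (fun s => PySem.Str.slice s (some (4*((1 + (c : Int))-1))) (some (4*(1 + (c : Int)))))
      = valA hexgrid r c := by
  have hm : hexgrid.length - r - 1 < hexgrid.length := by omega
  rw [show ((hexgrid.length : Int) - (1 + (r : Int)))
        = ((hexgrid.length - r - 1 : Nat) : Int) by omega,
      PySem.List.pyGet?_natCast, List.getElem?_map,
      List.getElem?_eq_getElem hm]
  set s := hexgrid[hexgrid.length - r - 1] with hsdef
  have hs : s ∈ hexgrid := List.getElem_mem _
  obtain ⟨hlen, hkeys⟩ := pre_row hpre hs
  rw [Option.map_some, encRow_eq hexgrid hpre s hs]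
  simp only [Option.bind_some, id, Option.map_some]
  have hch : s.toList.getD c ' ' ∈ hexKeys := hkeys c hc
  have hv := h2b_mem _ hch
  -- A's value
  have hvalA : valA hexgrid r c = some (hexVal (s.toList.getD c ' ')) := by
    unfold valA
    rw [List.getElem?_eq_getElem hm, ← hsdef]
    simp only [Option.bind_some]
    rw [List.getElem?_eq_getElem (show c < s.toList.length by omega)]
    simp only [Option.bind_some]
    rw [← List.getD_eq_getElem _ ' ' (show c < s.toList.length by omega)]
    exact hv.1
  rw [hvalA]
  congr 1
  -- string equality via toList
  apply String.toList_inj.mp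
  rw [PySem.Str.toList_slice, PySem.Chars.slice_eq_listSlice, PySem.Str.toList_join,
      List.map_map]
  simp only [Function.comp_def]
  set blocks := (List.range hexgrid.length).map
      (fun k => (hexVal (s.toList.getD k ' ')).toList) with hbdef
  have hjoin : PySem.Chars.join "".toList blocks = blocks.flatten := by
    have : ("" : String).toList = [] := rfl
    rw [this, join_nil_flatten]
  rw [show ((4*((1 + (c : Int))-1)) : Int) = ((4*c : Nat) : Int) by push_cast; ring,
      show ((4*(1 + (c : Int))) : Int) = ((4*c + 4 : Nat) : Int) by push_cast; ring,
      PySem.List.slice_natCast, hjoin]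
  have h4 : ∀ b ∈ blocks, b.length = 4 := by
    intro b hb
    rw [hbdef] at hb
    obtain ⟨k, hk, rfl⟩ := List.mem_map.mp hb
    exact (h2b_mem _ (hkeys k (List.mem_range.mp hk))).2
  have hcb : c < blocks.length := by rw [hbdef]; simpa using hc
  rw [show 4*c + 4 - 4*c = 4 by omega, flatten_block blocks h4 c hcb, hbdef,
      List.getD_eq_getElem _ _ (show c < ((List.range hexgrid.length).map
        (fun k => (hexVal (s.toList.getD k ' ')).toList)).length by simpa using hc)]
  simp

lemma portB_explicit (hexgrid : List String) (hpre : Pre_read_hexgrid hexgrid) :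
    read_hexgrid_alt hexgrid =
      List.replicate (hexgrid.length+1) (none : Option String) ::
        (List.range hexgrid.length).map (rowE hexgrid) := by
  unfold read_hexgrid_alt
  simp only [PySem.List.len_eq]
  have hrange : PySem.List.pyRange 1 ((hexgrid.length : Int)+1) 1
      = (List.range hexgrid.length).map (fun k : Nat => (1 : Int) + k) := by
    rw [PySem.List.pyRange_one]
    norm_num
  rw [hrange]
  congr 1
  rw [List.map_map]
  refine List.map_congr_left (fun c hc => ?_)
  have hcN : c < hexgrid.length := List.mem_range.mp hc
  unfold rowE
  simp only [Function.comp_def]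
  congr 1
  rw [List.map_map]
  refine List.map_congr_left (fun r hr => ?_)
  have hrN : r < hexgrid.length := List.mem_range.mp hr
  exact cellB_eq hexgrid hpre c r hcN hrN

-- ===== VERDICT (by name: the statement is the Claim_ definition above) =====
theorem read_hexgrid_spec : Claim_equal_read_hexgrid := by
  intro hexgrid _ hpre
  unfold Spec_read_hexgrid
  rw [portA_eq, Agrid_explicit, portB_explicit hexgrid hpre]
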